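-- pv_equiv track=rewrite | github.com/KateGordon21/ccsc | PackagePriorities-Cole.py | return_highest_recipient_priority
-- ===== SOURCE A (Python) =====
-- def return_highest_recipient_priority(packages):
--     highest_priority = 0
--     for package in packages:
--         highest_priority = max(highest_priority, package[4])
--
--     highest_priority_packages = []
--     for package in packages:
--         if package[4] == highest_priority:
--             highest_priority_packages.append(package)
--
--     return highest_priority_packages
-- ===== SOURCE B (Python) =====
-- def return_highest_recipient_priority(packages):
--     best = 0
--     result = []
--     for package in packages:
--         if package[4] > best:
--             best = package[4]
--             result = [package]
--         elif package[4] == best: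
--             result.append(package)
--     return result
-- ===== Notes on version B (the rewrite author's own statement) =====
-- stated objective: simpler
-- what changed: Replaced A's two passes (one to find the max priority, one to collect matching packages) by a single running-max pass that resets/extends the result list in place.
import Mathlib
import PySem

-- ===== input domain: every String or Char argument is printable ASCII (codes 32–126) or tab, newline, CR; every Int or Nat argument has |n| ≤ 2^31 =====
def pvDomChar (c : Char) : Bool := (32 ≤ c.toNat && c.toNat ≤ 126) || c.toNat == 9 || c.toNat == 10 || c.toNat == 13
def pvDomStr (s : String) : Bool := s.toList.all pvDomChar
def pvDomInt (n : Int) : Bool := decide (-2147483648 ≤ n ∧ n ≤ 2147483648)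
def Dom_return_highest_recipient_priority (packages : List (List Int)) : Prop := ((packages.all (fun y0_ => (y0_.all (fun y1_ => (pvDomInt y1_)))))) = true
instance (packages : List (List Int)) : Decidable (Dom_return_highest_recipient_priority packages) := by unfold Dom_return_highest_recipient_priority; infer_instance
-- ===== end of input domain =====

-- B collapses A's two passes (max-then-filter) into one running-max pass; simpler, same results.


-- ===== PORT A =====
-- package[4]; Pre_ guarantees the index is in range, so the getD 0 default is never taken on admitted inputs
def pvPrio (p : List Int) : Int := (PySem.List.pyGet? p 4).getD 0

def return_highest_recipient_priority (packages : List (List Int)) : List (List Int) :=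
  let highest_priority : Int := packages.foldl (fun h p => max h (pvPrio p)) 0
  packages.foldl (fun acc p => if pvPrio p = highest_priority then acc ++ [p] else acc) []

-- ===== PORT B =====
def return_highest_recipient_priority_alt (packages : List (List Int)) : List (List Int) :=
  (packages.foldl (fun (st : Int × List (List Int)) p =>
      if st.1 < pvPrio p then (pvPrio p, [p])
      else if pvPrio p = st.1 then (st.1, st.2 ++ [p])
      else st) ((0 : Int), ([] : List (List Int)))).2

-- ===== PRECONDITION & SPEC =====
-- Pre_ excludes exactly the inputs where A raises IndexError: some package shorter than 5 elements.
def Pre_return_highest_recipient_priority (packages : List (List Int)) : Prop :=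
  ∀ p ∈ packages, 5 ≤ p.length
instance (packages : List (List Int)) : Decidable (Pre_return_highest_recipient_priority packages) := by unfold Pre_return_highest_recipient_priority; infer_instance
def pvWitness_return_highest_recipient_priority : List (List Int) := [[1, 2, 3, 4, 5], [0, 0, 0, 0, 5]]

def Spec_return_highest_recipient_priority (packages : List (List Int)) (out : List (List Int)) : Prop := out = return_highest_recipient_priority_alt packages
instance (packages : List (List Int)) (out : List (List Int)) : Decidable (Spec_return_highest_recipient_priority packages out) := by unfold Spec_return_highest_recipient_priority; infer_instance

-- ===== CLAIM (what is proved, stated in full; the proofs are below) =====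
def Claim_equal_return_highest_recipient_priority : Prop := ∀ (packages : List (List Int)), Dom_return_highest_recipient_priority packages → Pre_return_highest_recipient_priority packages → Spec_return_highest_recipient_priority packages (return_highest_recipient_priority packages)

-- ===== LEMMAS AND PROOFS =====

def pvMx (b : Int) (l : List (List Int)) : Int := l.foldl (fun h p => max h (pvPrio p)) b

lemma pvMx_nil (b : Int) : pvMx b [] = b := rfl
lemma pvMx_cons (b : Int) (p : List Int) (l : List (List Int)) :
    pvMx b (p :: l) = pvMx (max b (pvPrio p)) l := rfl

lemma le_pvMx (b : Int) (l : List (List Int)) : b ≤ pvMx b l := by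
  induction l generalizing b with
  | nil => simp [pvMx_nil]
  | cons p l ih =>
    calc b ≤ max b (pvPrio p) := le_max_left _ _
    _ ≤ pvMx (max b (pvPrio p)) l := ih _
    _ = pvMx b (p :: l) := (pvMx_cons _ _ _).symm

-- A's collecting loop is a filter
lemma filterA (l : List (List Int)) (m : Int) (a : List (List Int)) :
    l.foldl (fun acc p => if pvPrio p = m then acc ++ [p] else acc) a
      = a ++ l.filter (fun p => pvPrio p = m) := by
  induction l generalizing a with
  | nil => simp
  | cons p l ih =>
    by_cases h : pvPrio p = m <;> simp [List.foldl_cons, h, ih]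

-- B's loop invariant
lemma loopB (l : List (List Int)) (b : Int) (r : List (List Int)) :
    l.foldl (fun (st : Int × List (List Int)) p =>
      if st.1 < pvPrio p then (pvPrio p, [p])
      else if pvPrio p = st.1 then (st.1, st.2 ++ [p])
      else st) (b, r)
    = (pvMx b l, (if pvMx b l = b then r else []) ++ l.filter (fun p => pvPrio p = pvMx b l)) := by
  induction l generalizing b r with
  | nil => simp [pvMx_nil]
  | cons p l ih =>
    rw [List.foldl_cons]
    by_cases h1 : b < pvPrio p
    · have hm : pvMx b (p :: l) = pvMx (pvPrio p) l := by
        rw [pvMx_cons]; congr 1; omega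
      have hle : pvPrio p ≤ pvMx (pvPrio p) l := le_pvMx _ _
      simp only [h1, if_true, ih]
      rw [hm]
      have hnb : ¬ pvMx (pvPrio p) l = b := by omega
      by_cases h2 : pvMx (pvPrio p) l = pvPrio p
      · simp [h2]
        intro hpb; omega
      · have : ¬ pvPrio p = pvMx (pvPrio p) l := fun h => h2 h.symm
        simp [h2, hnb, List.filter_cons, this]
    · have hm : pvMx b (p :: l) = pvMx b l := by
        rw [pvMx_cons]; congr 1; omega
      have hble : b ≤ pvMx b l := le_pvMx _ _
      simp only [h1, if_false]
      by_cases h2 : pvPrio p = b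
      · simp only [h2, if_true, ih, hm]
        by_cases h3 : pvMx b l = b
        · simp [h3, List.filter_cons, h2]
        · have : ¬ pvPrio p = pvMx b l := by omega
          simp [h3, List.filter_cons, this]
      · simp only [h2, if_false, ih, hm]
        have hlt : pvPrio p < b := by omega
        have : ¬ pvPrio p = pvMx b l := by omega
        simp [List.filter_cons, this]

-- ===== VERDICT (by name: the statement is the Claim_ definition above) =====
theorem return_highest_recipient_priority_spec : Claim_equal_return_highest_recipient_priority := by
  intro packages _ _
  unfold Spec_return_highest_recipient_priority
  unfold return_highest_recipient_priority return_highest_recipient_priority_alt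
  rw [loopB, filterA]
  simp only [List.nil_append, pvMx]
  split <;> rfl
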